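-- pv_equiv track=rewrite | github.com/BeyonderXX/MINER | utils/utils_ner.py | get_offsets
-- ===== SOURCE A (Python) =====
-- def get_offsets(tmp_valid_mask):
--     tmp_valid_mask.append(-1)
--     offsets = []
--     i = 0
--     while i < len(tmp_valid_mask) - 1:
--         if tmp_valid_mask[i] == 1:
--             tmp_l = i
--             while(tmp_valid_mask[i+1] == 0):
--                 i += 1
--             tmp_r = i
--             offsets.append((tmp_l, tmp_r))
--         i += 1
--
--     return offsets
-- ===== SOURCE B (Python) =====
-- def get_offsets(tmp_valid_mask):
--     tmp_valid_mask.append(-1)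
--     offsets = []
--     open_start = None
--     for i, v in enumerate(tmp_valid_mask):
--         if v == 1:
--             if open_start is not None:
--                 offsets.append((open_start, i - 1))
--             open_start = i
--         elif v != 0:
--             if open_start is not None:
--                 offsets.append((open_start, i - 1))
--             open_start = None
--     return offsets
-- ===== Notes on version B (the rewrite author's own statement) =====
-- stated objective: simpler
-- what changed: Replaced A's outer while with a nested zero-consuming inner while (index jumping) by one flat pass over the elements maintaining an open-interval start that is emitted at the next nonzero entry; the sentinel append to the argument is preserved.
import Mathlib
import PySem

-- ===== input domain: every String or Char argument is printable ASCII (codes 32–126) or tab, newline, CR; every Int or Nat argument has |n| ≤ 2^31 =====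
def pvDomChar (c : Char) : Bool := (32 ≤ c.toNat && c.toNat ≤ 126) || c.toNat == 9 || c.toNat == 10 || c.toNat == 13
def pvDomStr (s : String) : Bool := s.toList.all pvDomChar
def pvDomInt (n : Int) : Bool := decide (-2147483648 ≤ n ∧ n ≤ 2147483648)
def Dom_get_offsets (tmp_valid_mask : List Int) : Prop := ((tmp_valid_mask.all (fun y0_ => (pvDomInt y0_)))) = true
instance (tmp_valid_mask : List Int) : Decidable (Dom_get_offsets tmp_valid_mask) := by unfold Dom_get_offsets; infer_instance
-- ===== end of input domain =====

-- B replaces A's nested while loops (inner while consuming zeros) by one flat pass keeping an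
-- open-interval start that is emitted at the next nonzero entry (objective: simpler). Both
-- Pythons append a sentinel -1 to the argument in place (same side effect); the theorems here
-- are about the return value.

-- ===== PORT A =====
-- inner while loop `while tmp_valid_mask[i+1] == 0: i += 1`; the index stays in range at runtime
-- thanks to the appended -1 sentinel, so List.getD is exact here.  The fuel argument only bounds
-- the iteration count (each step increments i by 1, so fuel = m.length always suffices).
def pvAdvance (m : List Int) : Nat → Nat → Nat
  | 0, i => i
  | fuel + 1, i =>
    if i + 1 < m.length then
      if m.getD (i + 1) 0 == 0 then pvAdvance m fuel (i + 1) else i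
    else i

-- outer while loop of A; acc = offsets; fuel bounds the iteration count (i strictly increases
-- each round, so fuel = m.length suffices)
def pvLoopA (m : List Int) : Nat → Nat → List (Int × Int) → List (Int × Int)
  | 0, _, acc => acc
  | fuel + 1, i, acc =>
    if i < m.length - 1 then
      if m.getD i 0 == 1 then
        pvLoopA m fuel (pvAdvance m m.length i + 1)
          (acc ++ [((i : Int), (pvAdvance m m.length i : Int))])
      else
        pvLoopA m fuel (i + 1) acc
    else acc

def get_offsets (tmp_valid_mask : List Int) : List (Int × Int) :=
  pvLoopA (tmp_valid_mask ++ [-1]) (tmp_valid_mask.length + 1) 0 []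

-- ===== PORT B =====
-- `if open_start is not None: offsets.append((open_start, i - 1))`
def pvEmit (op : Option Nat) (i : Nat) (acc : List (Int × Int)) : List (Int × Int) :=
  match op with
  | some s => acc ++ [((s : Int), (i : Int) - 1)]
  | none => acc

-- B's single for-loop `for i, v in enumerate(...)`; state = (open_start, offsets)
def pvLoopB (i : Nat) (op : Option Nat) (acc : List (Int × Int)) :
    List Int → List (Int × Int)
  | [] => acc
  | v :: rest =>
    if v == 1 then pvLoopB (i + 1) (some i) (pvEmit op i acc) rest
    else if v == 0 then pvLoopB (i + 1) op acc rest
    else pvLoopB (i + 1) none (pvEmit op i acc) rest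

def get_offsets_alt (tmp_valid_mask : List Int) : List (Int × Int) :=
  pvLoopB 0 none [] (tmp_valid_mask ++ [-1])

-- ===== PRECONDITION & SPEC =====
def Spec_get_offsets (tmp_valid_mask : List Int) (out : List (Int × Int)) : Prop := out = get_offsets_alt tmp_valid_mask
instance (tmp_valid_mask : List Int) (out : List (Int × Int)) : Decidable (Spec_get_offsets tmp_valid_mask out) := by unfold Spec_get_offsets; infer_instance

-- ===== CLAIM (what is proved, stated in full; the proofs are below) =====
def Claim_equal_get_offsets : Prop := ∀ (tmp_valid_mask : List Int), Dom_get_offsets tmp_valid_mask → Spec_get_offsets tmp_valid_mask (get_offsets tmp_valid_mask)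

-- ===== LEMMAS AND PROOFS =====

theorem pvAdvance_ge (m : List Int) (fuel : Nat) :
    ∀ i, i ≤ pvAdvance m fuel i := by
  induction fuel with
  | zero => intro i; simp [pvAdvance]
  | succ fuel ih =>
    intro i
    simp only [pvAdvance]
    split_ifs with h1 h2
    · exact le_trans (by omega) (ih (i + 1))
    · omega
    · omega

-- with enough fuel, pvAdvance stops either at the end or just before a nonzero entry
theorem pvAdvance_stop (m : List Int) (fuel : Nat) :
    ∀ i, m.length ≤ i + 1 + fuel →
      m.length ≤ pvAdvance m fuel i + 1 ∨ m.getD (pvAdvance m fuel i + 1) 0 ≠ 0 := by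
  induction fuel with
  | zero => intro i hf; simp only [pvAdvance]; omega
  | succ fuel ih =>
    intro i hf
    simp only [pvAdvance]
    split_ifs with h1 h2
    · exact ih (i + 1) (by omega)
    · right; simpa using h2
    · omega

-- if the last entry is nonzero, pvAdvance never reaches it from inside the loop range
theorem pvAdvance_lt (m : List Int) (hlast : m.getD (m.length - 1) 0 ≠ 0) (fuel : Nat) :
    ∀ i, i < m.length - 1 → pvAdvance m fuel i < m.length - 1 := by
  induction fuel with
  | zero => intro i hi; simpa [pvAdvance] using hi
  | succ fuel ih =>
    intro i hi
    simp only [pvAdvance]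
    split_ifs with h1 h2
    · apply ih
      have : i + 1 ≠ m.length - 1 := by
        intro e; exact hlast (by rw [← e]; simpa using h2)
      omega
    · exact hi
    · exact hi

-- B's loop skips the zeros that A's inner while skips, keeping the interval open
theorem pvLoopB_adv (m : List Int) (fuel : Nat) :
    ∀ i s acc, pvLoopB (i + 1) (some s) acc (m.drop (i + 1)) =
      pvLoopB (pvAdvance m fuel i + 1) (some s) acc (m.drop (pvAdvance m fuel i + 1)) := by
  induction fuel with
  | zero => intro i s acc; simp [pvAdvance]
  | succ fuel ih =>
    intro i s acc
    simp only [pvAdvance]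
    split_ifs with h1 h2
    · rw [List.drop_eq_getElem_cons h1]
      have hv : m[i + 1] = 0 := by
        have := h2; rwa [List.getD_eq_getElem _ _ h1, beq_iff_eq] at this
      simp only [pvLoopB, hv]
      norm_num
      exact ih (i + 1) s acc
    · rfl
    · rfl

-- closing an open interval at a nonzero entry: carrying `some s` into a nonzero position is
-- the same as emitting (s, j-1) there and carrying `none`
theorem pvLoopB_close (m : List Int) (j : Nat) (s : Nat) (acc : List (Int × Int))
    (hj : j < m.length) (hv : m.getD j 0 ≠ 0) :
    pvLoopB j (some s) acc (m.drop j) =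
      pvLoopB j none (acc ++ [((s : Int), (j : Int) - 1)]) (m.drop j) := by
  rw [List.drop_eq_getElem_cons hj]
  have hv' : m[j] ≠ 0 := by rwa [List.getD_eq_getElem _ _ hj] at hv
  by_cases h1 : m[j] = 1
  · simp [pvLoopB, h1, pvEmit]
  · simp [pvLoopB, h1, hv', pvEmit]

-- main invariant: with a nonzero last entry and enough fuel, A's loop from i equals B's loop
-- over the rest of the list with no open interval
theorem pvMain (m : List Int) (hlast : m.getD (m.length - 1) 0 ≠ 0) (fuel : Nat) :
    ∀ i acc, m.length ≤ i + fuel →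
      pvLoopA m fuel i acc = pvLoopB i none acc (m.drop i) := by
  induction fuel with
  | zero =>
    intro i acc hf
    rw [List.drop_eq_nil_of_le (by omega)]
    simp [pvLoopA, pvLoopB]
  | succ fuel ih =>
    intro i acc hf
    simp only [pvLoopA]
    split_ifs with hi h1
    · -- mask[i] == 1: A consumes the zeros with pvAdvance, B walks over them
      have hilen : i < m.length := by omega
      rw [List.drop_eq_getElem_cons hilen]
      have hv : m[i] = 1 := by
        have := h1; rwa [List.getD_eq_getElem _ _ hilen, beq_iff_eq] at this
      simp only [pvLoopB, hv]
      norm_num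
      show pvLoopA m fuel _ _ = pvLoopB (i + 1) (some i) (pvEmit none i acc) (m.drop (i + 1))
      rw [show pvEmit none i acc = acc from rfl]
      rw [pvLoopB_adv m m.length i i acc]
      have hrge : i ≤ pvAdvance m m.length i := pvAdvance_ge m m.length i
      have hrlt : pvAdvance m m.length i < m.length - 1 := pvAdvance_lt m hlast m.length i hi
      have hnz : m.getD (pvAdvance m m.length i + 1) 0 ≠ 0 := by
        rcases pvAdvance_stop m m.length i (by omega) with h | h
        · omega
        · exact h
      rw [pvLoopB_close m (pvAdvance m m.length i + 1) i acc (by omega) hnz]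
      rw [ih (pvAdvance m m.length i + 1) _ (by omega)]
      have he : ((pvAdvance m m.length i + 1 : Nat) : Int) - 1 =
          (pvAdvance m m.length i : Int) := by push_cast; ring
      rw [he]
    · -- mask[i] not 1: both loops just move on (B emits nothing: no interval is open)
      have hilen : i < m.length := by omega
      rw [List.drop_eq_getElem_cons hilen]
      have hv : ¬ m[i] = 1 := by
        have := h1; rwa [List.getD_eq_getElem _ _ hilen, beq_iff_eq] at this
      by_cases h0 : m[i] = 0
      · simp only [pvLoopB]
        norm_num
        rw [if_neg hv, if_pos h0]
        exact ih (i + 1) acc (by omega)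
      · simp only [pvLoopB]
        norm_num
        rw [if_neg hv, if_neg h0]
        exact ih (i + 1) acc (by omega)
    · -- A's loop is over (i ≥ len-1); B at most still visits the sentinel, emitting nothing
      by_cases h2 : i < m.length
      · have hieq : i = m.length - 1 := by omega
        rw [List.drop_eq_getElem_cons h2]
        have hrest : m.drop (i + 1) = [] := List.drop_eq_nil_of_le (by omega)
        by_cases hv1 : m[i] = 1
        · simp [pvLoopB, hv1, hrest, pvEmit]
        · by_cases hv0 : m[i] = 0
          · simp [pvLoopB, hv0, hrest]
          · simp [pvLoopB, hv1, hv0, hrest, pvEmit]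
      · rw [List.drop_eq_nil_of_le (by omega)]
        simp [pvLoopB]

-- the appended sentinel -1 makes the last entry of the worked-on list nonzero
theorem pvLast_sentinel (m : List Int) :
    (m ++ [-1]).getD ((m ++ [-1]).length - 1) 0 ≠ 0 := by
  simp [List.getD]

-- ===== VERDICT (by name: the statement is the Claim_ definition above) =====
theorem get_offsets_spec : Claim_equal_get_offsets := by
  intro mask _
  unfold Spec_get_offsets get_offsets get_offsets_alt
  rw [pvMain (mask ++ [-1]) (pvLast_sentinel mask) (mask.length + 1) 0 [] (by simp)]
  simp
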